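-- pv_equiv track=rewrite | github.com/anon-operation/NYT-Sourcer | NYT_litePacker_Historical_noKey_3.0.py | NumericalCompare
-- ===== SOURCE A (Python) =====
-- def NumericalCompare(dictionary,aList):
--     likelySources = []
--     theList = dictionary.keys()
--     for item in aList:
--         likelySourceNumber = min(theList, key=lambda x:abs(x-item))
--         source = dictionary[likelySourceNumber]
--         likelySources.append(source)
--     return likelySources
-- ===== SOURCE B (Python) =====
-- def NumericalCompare(dictionary, aList):
--     keys = list(dictionary)
--     rank = {k: r for r, k in enumerate(keys)}
--     skeys = sorted(keys)
--     n = len(skeys)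
--     out = []
--     for item in aList:
--         lo, hi = 0, n
--         while lo < hi:
--             mid = (lo + hi) // 2
--             if skeys[mid] < item:
--                 lo = mid + 1
--             else:
--                 hi = mid
--         cands = skeys[max(lo - 1, 0):lo + 1]
--         best = cands[0]
--         for k in cands[1:]:
--             if (abs(k - item), rank[k]) < (abs(best - item), rank[best]):
--                 best = k
--         out.append(dictionary[best])
--     return out
-- ===== Notes on version B (the rewrite author's own statement) =====
-- stated objective: faster
-- what changed: B sorts the keys once and binary-searches the insertion point per item, comparing only the two adjacent candidate keys (with a precomputed insertion-rank dict replicating min's first-wins tie-break), instead of A's full linear min-scan over all keys for every item; Pre_ excludes only the empty dictionary with a nonempty aList, where A raises ValueError (min of empty sequence) and B raises IndexError.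
import Mathlib
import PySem

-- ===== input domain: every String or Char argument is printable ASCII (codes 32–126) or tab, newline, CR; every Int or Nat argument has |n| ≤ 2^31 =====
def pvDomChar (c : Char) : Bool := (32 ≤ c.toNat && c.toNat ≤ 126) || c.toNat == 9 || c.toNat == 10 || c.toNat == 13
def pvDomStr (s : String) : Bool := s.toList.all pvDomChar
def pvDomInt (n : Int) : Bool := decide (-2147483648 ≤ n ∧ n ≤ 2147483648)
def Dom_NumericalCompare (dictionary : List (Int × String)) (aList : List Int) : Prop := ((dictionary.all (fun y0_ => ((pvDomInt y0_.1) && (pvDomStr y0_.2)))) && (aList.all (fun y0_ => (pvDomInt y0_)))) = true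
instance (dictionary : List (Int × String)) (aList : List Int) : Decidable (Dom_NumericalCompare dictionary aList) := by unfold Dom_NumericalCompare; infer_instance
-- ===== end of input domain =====

-- B sorts the dict keys once and binary-searches the two adjacent candidate keys per item
-- (rank dict replicates min's first-wins tie-break) instead of A's per-item linear min-scan.


-- ===== PORT A =====
-- the assoc-list argument denotes the Python dict: PySem.Dict.ofList gives its key view / lookups
def NumericalCompare (dictionary : List (Int × String)) (aList : List Int) : List String :=
  let d := PySem.Dict.ofList dictionary
  let theList := d.keys
  aList.foldl (fun likelySources item =>
    match PySem.List.min? theList (fun x => (x - item).natAbs) with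
    | some likelySourceNumber => likelySources ++ [d.getD likelySourceNumber ""]
    | none => likelySources) []   -- none: min() of empty sequence raises ValueError; excluded by Pre_

-- ===== PORT B =====
-- the hand-written while-loop binary search of Source B (lowest lo with item ≤ skeys[lo])
def pvBisect (skeys : List Int) (item : Int) (lo hi : Nat) : Nat :=
  if lo < hi then
    let mid := (lo + hi) / 2
    if skeys.getD mid 0 < item then pvBisect skeys item (mid + 1) hi
    else pvBisect skeys item lo mid
  else lo
termination_by hi - lo
decreasing_by
  · have : (lo + hi) / 2 < hi := Nat.div_lt_of_lt_mul (by omega)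
    omega
  · have : lo ≤ (lo + hi) / 2 := Nat.le_div_iff_mul_le (by norm_num) |>.mpr (by omega)
    have : (lo + hi) / 2 < hi := Nat.div_lt_of_lt_mul (by omega)
    omega

def NumericalCompare_alt (dictionary : List (Int × String)) (aList : List Int) : List String :=
  let d := PySem.Dict.ofList dictionary
  let keys := d.keys
  let rank := PySem.Dict.ofList ((PySem.List.enumerate keys).map (fun p => (p.2, p.1)))
  let skeys := PySem.List.sorted keys (fun x => x)
  let n := skeys.length
  aList.foldl (fun out item =>
    let lo := pvBisect skeys item 0 n
    let cands := PySem.List.slice skeys (some ((lo - 1 : Nat) : Int)) (some ((lo + 1 : Nat) : Int))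
    match cands with
    | [] => out   -- cands[0] on the empty dict raises IndexError; excluded by Pre_
    | best0 :: rest =>
      -- Python's tuple (abs(k-item), rank[k]) < (abs(best-item), rank[best]) is lexicographic:
      let best := rest.foldl (fun best k =>
        if (k - item).natAbs < (best - item).natAbs ∨
           ((k - item).natAbs = (best - item).natAbs ∧ rank.getD k 0 < rank.getD best 0)
        then k else best) best0
      out ++ [d.getD best ""]) []

-- ===== PRECONDITION & SPEC =====
-- Pre_ excludes only the empty dictionary with a nonempty aList: there A raises
-- ValueError (min() of an empty sequence) and B raises IndexError (cands[0]).
def Pre_NumericalCompare (dictionary : List (Int × String)) (aList : List Int) : Prop :=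
  dictionary ≠ [] ∨ aList = []
instance (dictionary : List (Int × String)) (aList : List Int) : Decidable (Pre_NumericalCompare dictionary aList) := by unfold Pre_NumericalCompare; infer_instance
def pvWitness_NumericalCompare : (List (Int × String)) × List Int := ([(1, "a"), (5, "b")], [2, 4])
def Spec_NumericalCompare (dictionary : List (Int × String)) (aList : List Int) (out : List String) : Prop := out = NumericalCompare_alt dictionary aList
instance (dictionary : List (Int × String)) (aList : List Int) (out : List String) : Decidable (Spec_NumericalCompare dictionary aList out) := by unfold Spec_NumericalCompare; infer_instance

-- ===== CLAIM (what is proved, stated in full; the proofs are below) =====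
def Claim_equal_NumericalCompare : Prop := ∀ (dictionary : List (Int × String)) (aList : List Int), Dom_NumericalCompare dictionary aList → Pre_NumericalCompare dictionary aList → Spec_NumericalCompare dictionary aList (NumericalCompare dictionary aList)


-- ===== LEMMAS AND PROOFS =====

theorem pv_keys_insert {κ ν : Type} [BEq κ] [LawfulBEq κ] (d : PySem.Dict κ ν) (k : κ) (v : ν) :
    (d.insert k v).keys = if d.contains k then d.keys else d.keys ++ [k] := by
  unfold PySem.Dict.insert PySem.Dict.keys
  split_ifs with hc
  · simp only [List.map_map]
    refine List.map_congr_left ?_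
    intro p _
    by_cases h : p.1 == k
    · simp [(eq_of_beq h).symm]
    · simp [h]
  · simp

theorem pv_nodup_keys_insert {κ ν : Type} [BEq κ] [LawfulBEq κ] (d : PySem.Dict κ ν) (k : κ) (v : ν)
    (h : d.keys.Nodup) : (d.insert k v).keys.Nodup := by
  rw [pv_keys_insert]
  split_ifs with hc
  · exact h
  · have : k ∉ d.keys := fun hm => hc ((PySem.Dict.contains_iff_mem_keys d k).mpr hm)
    refine List.Nodup.append h (List.nodup_singleton k) ?_
    intro a ha hak
    rw [List.mem_singleton] at hak
    exact this (hak ▸ ha)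

theorem pv_nodup_keys_update {κ ν : Type} [BEq κ] [LawfulBEq κ] :
    ∀ (ps : List (κ × ν)) (d : PySem.Dict κ ν), d.keys.Nodup → (d.update ps).keys.Nodup := by
  intro ps
  induction ps with
  | nil => intro d h; exact h
  | cons p rest ih =>
    intro d h
    exact ih _ (pv_nodup_keys_insert d p.1 p.2 h)

theorem pv_nodup_keys_ofList {κ ν : Type} [BEq κ] [LawfulBEq κ] (ps : List (κ × ν)) :
    (PySem.Dict.ofList ps).keys.Nodup := by
  exact pv_nodup_keys_update ps PySem.Dict.empty (by simp [PySem.Dict.empty, PySem.Dict.keys])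

theorem pv_items_insert_length {κ ν : Type} [BEq κ] (d : PySem.Dict κ ν) (k : κ) (v : ν) :
    d.items.length ≤ (d.insert k v).items.length := by
  unfold PySem.Dict.insert
  split_ifs <;> simp

theorem pv_items_update_length {κ ν : Type} [BEq κ] :
    ∀ (ps : List (κ × ν)) (d : PySem.Dict κ ν), d.items.length ≤ (d.update ps).items.length := by
  intro ps
  induction ps with
  | nil => intro d; exact le_refl _
  | cons p rest ih =>
    intro d
    exact le_trans (pv_items_insert_length d p.1 p.2) (ih _)

theorem pv_keys_ofList_ne_nil {κ ν : Type} [BEq κ] (ps : List (κ × ν)) (h : ps ≠ []) :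
    (PySem.Dict.ofList ps).keys ≠ [] := by
  obtain ⟨p, rest, rfl⟩ := List.exists_cons_of_ne_nil h
  have h1 : (PySem.Dict.empty.insert p.1 p.2 : PySem.Dict κ ν).items.length = 1 := by
    simp [PySem.Dict.insert, PySem.Dict.empty, PySem.Dict.contains]
  have h2 := pv_items_update_length rest (PySem.Dict.empty.insert p.1 p.2 : PySem.Dict κ ν)
  rw [h1] at h2
  have : (PySem.Dict.ofList (p :: rest)).items.length ≠ 0 := by
    show ((PySem.Dict.empty.update (p :: rest)).items.length ≠ 0)
    rw [show PySem.Dict.empty.update (p :: rest) = (PySem.Dict.empty.insert p.1 p.2).update rest from rfl]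
    omega
  intro hk
  unfold PySem.Dict.keys at hk
  simp [List.map_eq_nil_iff] at hk
  simp [hk] at this

theorem pv_items_update_of_nodup {κ ν : Type} [BEq κ] [LawfulBEq κ] :
    ∀ (ps : List (κ × ν)) (d : PySem.Dict κ ν), (d.keys ++ ps.map Prod.fst).Nodup →
      (d.update ps).items = d.items ++ ps := by
  intro ps
  induction ps with
  | nil => intro d _; simp [PySem.Dict.update]
  | cons p rest ih =>
    intro d h
    have hnotmem : p.1 ∉ d.keys := by
      simp [List.nodup_append] at h
      intro hm; exact (h.2.2 p.1 hm).1 rfl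
    have hc : d.contains p.1 = false := by
      by_contra hcc
      simp at hcc
      exact hnotmem ((PySem.Dict.contains_iff_mem_keys d p.1).mp hcc)
    have hins : (d.insert p.1 p.2).items = d.items ++ [p] := by
      unfold PySem.Dict.insert
      rw [hc]; simp
    have hkeys : (d.insert p.1 p.2).keys = d.keys ++ [p.1] := by
      unfold PySem.Dict.keys
      rw [hins]; simp
    rw [show d.update (p :: rest) = (d.insert p.1 p.2).update rest from rfl]
    rw [ih _ (by simpa [hkeys, List.append_assoc] using h), hins]
    simp

theorem pv_items_ofList_of_nodup {κ ν : Type} [BEq κ] [LawfulBEq κ] (ps : List (κ × ν))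
    (h : (ps.map Prod.fst).Nodup) : (PySem.Dict.ofList ps).items = ps := by
  have := pv_items_update_of_nodup ps PySem.Dict.empty (by simpa [PySem.Dict.empty, PySem.Dict.keys])
  simpa [PySem.Dict.empty] using this

theorem pv_find?_enumerate_swap (keys : List Int) :
    ∀ (s : Int) (k : Int), k ∈ keys →
      List.find? (fun p => p.1 == k) ((PySem.List.enumerate keys s).map (fun p => (p.2, p.1)))
        = some (k, s + keys.idxOf k) := by
  induction keys with
  | nil => intro s k hk; simp at hk
  | cons a rest ih =>
    intro s k hk
    rw [PySem.List.enumerate_cons]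
    by_cases h : a = k
    · subst h
      simp [List.idxOf_cons_self]
    · have hk' : k ∈ rest := by
        rcases List.mem_cons.mp hk with h1 | h1
        · exact absurd h1.symm h
        · exact h1
      have hne : (a == k) = false := by simp [h]
      simp only [List.map_cons, List.find?_cons, hne]
      rw [ih (s+1) k hk']
      have : (a :: rest).idxOf k = rest.idxOf k + 1 := by
        rw [List.idxOf_cons]
        simp [hne]
      rw [this]
      congr 1
      push_cast
      ring_nf

theorem pv_rank_getD (keys : List Int) (hnd : keys.Nodup) (k : Int) (hk : k ∈ keys) :
    (PySem.Dict.ofList ((PySem.List.enumerate keys).map (fun p => (p.2, p.1)))).getD k 0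
      = (keys.idxOf k : Int) := by
  have hfst : ((PySem.List.enumerate keys 0).map (fun p => (p.2, p.1))).map Prod.fst = keys := by
    rw [List.map_map]
    exact PySem.List.map_snd_enumerate keys 0
  have hitems := pv_items_ofList_of_nodup ((PySem.List.enumerate keys 0).map (fun p => (p.2, p.1)))
    (by rw [hfst]; exact hnd)
  unfold PySem.Dict.getD PySem.Dict.get?
  rw [hitems, pv_find?_enumerate_swap keys 0 k hk]
  simp

def pvGFold (key : Int → Nat) (a : Int) (xs : List Int) : Int :=
  xs.foldl (fun m y => if key y < key m then y else m) a

theorem pvGFold_le (key : Int → Nat) : ∀ (xs : List Int) (a : Int), key (pvGFold key a xs) ≤ key a := by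
  intro xs
  induction xs with
  | nil => intro a; simp [pvGFold]
  | cons y t ih =>
    intro a
    show key (pvGFold key (if key y < key a then y else a) t) ≤ key a
    split_ifs with h
    · exact le_trans (ih y) (le_of_lt h)
    · exact ih a

theorem pv_min?_foldl_some (key : Int → Nat) (f : Option Int → Int → Option Int)
    (hf : ∀ a x, f (some a) x = some (if key x < key a then x else a)) :
    ∀ (xs : List Int) (a : Int), xs.foldl f (some a) = some (pvGFold key a xs) := by
  intro xs
  induction xs with
  | nil => intro a; rfl
  | cons y t ih =>
    intro a
    rw [List.foldl_cons, hf]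
    have hstep : pvGFold key a (y :: t) = pvGFold key (if key y < key a then y else a) t := rfl
    rw [hstep]
    exact ih _

theorem pv_min?_cons (key : Int → Nat) (x : Int) (xs : List Int) :
    PySem.List.min? (x :: xs) key = some (pvGFold key x xs) := by
  unfold PySem.List.min?
  rw [List.foldl_cons]
  refine pv_min?_foldl_some key _ (fun a x => by split <;> rename_i heq <;> [exact absurd heq (by simp); (injection heq with h; subst h; split <;> rfl)]) xs x

theorem pvGFold_split (key : Int → Nat) :
    ∀ (xs : List Int) (a : Int), ∃ pre post, a :: xs = pre ++ pvGFold key a xs :: post ∧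
      ∀ y ∈ pre, key (pvGFold key a xs) < key y := by
  intro xs
  induction xs with
  | nil => intro a; exact ⟨[], [], rfl, by simp⟩
  | cons y t ih =>
    intro a
    have hstep : pvGFold key a (y :: t) = pvGFold key (if key y < key a then y else a) t := rfl
    by_cases h : key y < key a
    · obtain ⟨pre, post, hdec, hpre⟩ := ih y
      refine ⟨a :: pre, post, ?_, ?_⟩
      · rw [hstep, if_pos h, List.cons_append, ← hdec]
      · intro z hz
        rcases List.mem_cons.mp hz with rfl | hz'
        · rw [hstep, if_pos h]
          exact lt_of_le_of_lt (pvGFold_le key t y) h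
        · rw [hstep, if_pos h]; exact hpre z hz'
    · obtain ⟨pre, post, hdec, hpre⟩ := ih a
      rw [hstep, if_neg h]
      cases pre with
      | nil =>
        simp only [List.nil_append] at hdec
        have ha : pvGFold key a t = a := by injection hdec with h1 _; exact h1.symm
        refine ⟨[], y :: t, ?_, by simp⟩
        rw [ha]
        rfl
      | cons p pre' =>
        have hp : p = a := by injection hdec with h1 _; exact h1.symm
        have htail : t = pre' ++ pvGFold key a t :: post := by injection hdec
        have hma : key (pvGFold key a t) < key a := hpre a (by rw [hp] at hdec ⊢; exact List.mem_cons_self ..)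
        refine ⟨a :: y :: pre', post, ?_, ?_⟩
        · rw [List.cons_append, List.cons_append, ← htail]
        · intro z hz
          rcases List.mem_cons.mp hz with rfl | hz'
          · exact hma
          rcases List.mem_cons.mp hz' with rfl | hz''
          · exact lt_of_lt_of_le hma (le_of_not_gt h)
          · exact hpre z (by rw [hp]; exact List.mem_cons_of_mem a hz'')

theorem pv_min?_first (key : Int → Nat) (xs : List Int) (m : Int)
    (h : PySem.List.min? xs key = some m) :
    ∀ y ∈ xs, key y = key m → xs.idxOf m ≤ xs.idxOf y := by
  cases xs with
  | nil => simp [PySem.List.min?] at h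
  | cons x t =>
    rw [pv_min?_cons] at h
    injection h with hm
    obtain ⟨pre, post, hdec, hpre⟩ := pvGFold_split key t x
    rw [hm] at hdec hpre
    intro y hy hkey
    have hmpre : m ∉ pre := fun hc => lt_irrefl (key m) (hpre m hc)
    have hypre : y ∉ pre := fun hc => by
      have := hpre y hc; rw [hkey] at this; exact lt_irrefl _ this
    rw [hdec, List.idxOf_append, List.idxOf_append, if_neg hmpre, if_neg hypre,
        List.idxOf_cons_self]
    omega

theorem pvBisect_spec (skeys : List Int) (item : Int) (hsorted : skeys.Pairwise (· ≤ ·)) :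
    ∀ (lo hi : Nat), lo ≤ hi → hi ≤ skeys.length →
      (∀ j, j < lo → skeys.getD j 0 < item) →
      (∀ j, hi ≤ j → j < skeys.length → item ≤ skeys.getD j 0) →
      lo ≤ pvBisect skeys item lo hi ∧ pvBisect skeys item lo hi ≤ hi ∧
      (∀ j, j < pvBisect skeys item lo hi → skeys.getD j 0 < item) ∧
      (∀ j, pvBisect skeys item lo hi ≤ j → j < skeys.length → item ≤ skeys.getD j 0) := by
  have hmono : ∀ (i j : Nat), i ≤ j → j < skeys.length → skeys.getD i 0 ≤ skeys.getD j 0 := by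
    intro i j hij hj
    rcases Nat.lt_or_ge i j with hc | hc
    · rw [List.getD_eq_getElem _ _ (by omega), List.getD_eq_getElem _ _ hj]
      exact List.pairwise_iff_getElem.mp hsorted i j (by omega) hj hc
    · have : i = j := by omega
      rw [this]
  intro lo hi
  induction lo, hi using pvBisect.induct skeys item with
  | case1 lo hi hlt mid hmidlt ih =>
    intro hle hhi hlow hhigh
    have hmid : mid = (lo + hi) / 2 := rfl
    rw [pvBisect, if_pos hlt]
    simp only []
    rw [← hmid, if_pos hmidlt]
    have hmid1 : lo ≤ mid := by rw [hmid]; exact Nat.le_div_iff_mul_le (by norm_num) |>.mpr (by omega)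
    have hmid2 : mid < hi := by rw [hmid]; exact Nat.div_lt_of_lt_mul (by omega)
    have hlow' : ∀ j, j < mid + 1 → skeys.getD j 0 < item := by
      intro j hj
      rcases Nat.lt_or_ge j mid with hc | hc
      · exact lt_of_le_of_lt (hmono j mid (by omega) (by omega)) hmidlt
      · have : j = mid := by omega
        rw [this]; exact hmidlt
    obtain ⟨h1, h2, h3, h4⟩ := ih (by omega) hhi hlow' hhigh
    exact ⟨by omega, h2, h3, h4⟩
  | case2 lo hi hlt mid hmidge ih =>
    intro hle hhi hlow hhigh
    have hmid : mid = (lo + hi) / 2 := rfl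
    rw [pvBisect, if_pos hlt]
    simp only []
    rw [← hmid, if_neg hmidge]
    have hmid1 : lo ≤ mid := by rw [hmid]; exact Nat.le_div_iff_mul_le (by norm_num) |>.mpr (by omega)
    have hmid2 : mid < hi := by rw [hmid]; exact Nat.div_lt_of_lt_mul (by omega)
    have hhigh' : ∀ j, mid ≤ j → j < skeys.length → item ≤ skeys.getD j 0 := by
      intro j hj hjlen
      exact le_trans (le_of_not_gt hmidge) (hmono mid j hj hjlen)
    obtain ⟨h1, h2, h3, h4⟩ := ih hmid1 (by omega) hlow hhigh'
    exact ⟨h1, by omega, h3, h4⟩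
  | case3 lo hi hnlt =>
    intro hle hhi hlow hhigh
    rw [pvBisect, if_neg hnlt]
    exact ⟨le_refl _, hle, hlow, fun j hj hjl => hhigh j (by omega) hjl⟩

theorem pv_unique (keys : List Int) (item : Int) (best : Int) (hbmem : best ∈ keys)
    (hb : ∀ y ∈ keys, (best - item).natAbs ≤ (y - item).natAbs ∧
        ((y - item).natAbs = (best - item).natAbs → keys.idxOf best ≤ keys.idxOf y)) :
    PySem.List.min? keys (fun x => (x - item).natAbs) = some best := by
  obtain ⟨x, t, rfl⟩ := List.exists_cons_of_ne_nil (List.ne_nil_of_mem hbmem)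
  have hm : PySem.List.min? (x :: t) (fun z => (z - item).natAbs) = some (pvGFold (fun z => (z - item).natAbs) x t) :=
    pv_min?_cons _ x t
  set m := pvGFold (fun z => (z - item).natAbs) x t with hmdef
  have hmem : m ∈ x :: t := PySem.List.min?_mem hm
  have hmin : ∀ y ∈ x :: t, (m - item).natAbs ≤ (y - item).natAbs := PySem.List.min?_isMin hm
  have hfirst := pv_min?_first (fun z => (z - item).natAbs) (x :: t) m hm
  have h1 : (m - item).natAbs ≤ (best - item).natAbs := hmin best hbmem
  have h2 : (best - item).natAbs ≤ (m - item).natAbs := (hb m hmem).1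
  have heq : (best - item).natAbs = (m - item).natAbs := le_antisymm h2 h1
  have i1 : (x :: t).idxOf m ≤ (x :: t).idxOf best := hfirst best hbmem heq
  have i2 : (x :: t).idxOf best ≤ (x :: t).idxOf m := (hb m hmem).2 heq.symm
  have : m = best := (List.idxOf_inj hmem).mp (le_antisymm i1 i2)
  rw [hm, this]
theorem pv_slice_one (skeys : List Int) (h : 0 < skeys.length) :
    PySem.List.slice skeys (some ((0 - 1 : Nat) : Int)) (some ((0 + 1 : Nat) : Int))
      = [skeys[0]] := by
  have h1 : (0 - 1 : Nat) = 0 := rfl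
  have h2 : (0 + 1 : Nat) = 1 := rfl
  rw [h1, h2, PySem.List.slice_natCast]
  have hd1 : skeys.drop 0 = skeys[0] :: skeys.drop 1 := List.drop_eq_getElem_cons h
  rw [hd1]
  rfl

theorem pv_slice_mid (skeys : List Int) (i : Nat) (h : i + 1 < skeys.length) :
    PySem.List.slice skeys (some ((i + 1 - 1 : Nat) : Int)) (some ((i + 1 + 1 : Nat) : Int))
      = [skeys[i], skeys[i + 1]] := by
  have h1 : (i + 1 - 1 : Nat) = i := rfl
  rw [h1, PySem.List.slice_natCast]
  have hd1 : skeys.drop i = skeys[i] :: skeys.drop (i + 1) := List.drop_eq_getElem_cons (by omega)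
  have hd2 : skeys.drop (i + 1) = skeys[i + 1] :: skeys.drop (i + 2) := List.drop_eq_getElem_cons h
  rw [hd1, hd2]
  have h2 : (i + 1 + 1 - i : Nat) = 2 := by omega
  rw [h2]
  rfl

theorem pv_slice_last (skeys : List Int) (h : 0 < skeys.length) :
    PySem.List.slice skeys (some ((skeys.length - 1 : Nat) : Int)) (some ((skeys.length + 1 : Nat) : Int))
      = [skeys[skeys.length - 1]] := by
  rw [PySem.List.slice_natCast]
  have hd1 : skeys.drop (skeys.length - 1) = skeys[skeys.length - 1] :: skeys.drop (skeys.length - 1 + 1) :=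
    List.drop_eq_getElem_cons (by omega)
  have hd2 : skeys.drop (skeys.length - 1 + 1) = [] := by
    have : skeys.length - 1 + 1 = skeys.length := by omega
    rw [this, List.drop_length]
  rw [hd1, hd2]
  have h2 : (skeys.length + 1 - (skeys.length - 1) : Nat) = 2 := by omega
  rw [h2]
  rfl
theorem pv_core (keys : List Int) (hnd : keys.Nodup) (hne : keys ≠ []) (item : Int)
    (best0 : Int) (rest : List Int)
    (hcands : PySem.List.slice (PySem.List.sorted keys (fun x => x))
        (some (((pvBisect (PySem.List.sorted keys (fun x => x)) item 0
                  (PySem.List.sorted keys (fun x => x)).length - 1 : Nat) : Int)))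
        (some (((pvBisect (PySem.List.sorted keys (fun x => x)) item 0
                  (PySem.List.sorted keys (fun x => x)).length + 1 : Nat) : Int)))
      = best0 :: rest) :
    PySem.List.min? keys (fun x => (x - item).natAbs)
      = some (rest.foldl (fun best k =>
          if (k - item).natAbs < (best - item).natAbs ∨
             ((k - item).natAbs = (best - item).natAbs ∧
              (PySem.Dict.ofList ((PySem.List.enumerate keys).map (fun p => (p.2, p.1)))).getD k 0
                < (PySem.Dict.ofList ((PySem.List.enumerate keys).map (fun p => (p.2, p.1)))).getD best 0)
          then k else best) best0) := by
  set skeys := PySem.List.sorted keys (fun x => x) with hskdef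
  have hperm : skeys.Perm keys := PySem.List.sorted_perm keys (fun x => x) false
  have hndsk : skeys.Nodup := hperm.nodup_iff.mpr hnd
  have hle : skeys.Pairwise (fun a b => a ≤ b) := PySem.List.sorted_pairwise keys (fun x => x)
  have hlt : skeys.Pairwise (· < ·) := by
    have hand := List.Pairwise.and hle hndsk
    exact hand.imp (fun h => lt_of_le_of_ne h.1 h.2)
  have hn0 : 0 < skeys.length := by
    rw [hperm.length_eq]
    exact List.length_pos_of_ne_nil hne
  set n := skeys.length with hndef
  set lo := pvBisect skeys item 0 n with hlodef
  obtain ⟨-, hloN, hlow, hhigh⟩ := pvBisect_spec skeys item hle 0 n (Nat.zero_le _) (le_refl _)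
    (by intro j hj; omega) (by intro j h1 h2; omega)
  have hlowE : ∀ (j : Nat) (hj : j < n), j < lo → skeys[j] < item := by
    intro j hj hjlo
    have := hlow j hjlo
    rwa [List.getD_eq_getElem _ _ hj] at this
  have hhighE : ∀ (j : Nat) (hj : j < n), lo ≤ j → item ≤ skeys[j] := by
    intro j hj hjlo
    have := hhigh j hjlo hj
    rwa [List.getD_eq_getElem _ _ hj] at this
  have hmono := List.pairwise_iff_getElem.mp hlt
  have hmemk : ∀ (j : Nat) (hj : j < n), skeys[j] ∈ keys := by
    intro j hj
    exact hperm.mem_iff.mp (List.getElem_mem hj)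
  have hrank : ∀ k ∈ keys,
      (PySem.Dict.ofList ((PySem.List.enumerate keys).map (fun p => (p.2, p.1)))).getD k 0
        = (keys.idxOf k : Int) := fun k hk => pv_rank_getD keys hnd k hk
  rcases Nat.eq_zero_or_pos lo with hlo0 | hlopos
  · -- lo = 0 : item ≤ every key, unique nearest is skeys[0]
    rw [hlo0] at hcands
    rw [pv_slice_one skeys hn0] at hcands
    obtain ⟨hb0, hrest⟩ : best0 = skeys[0] ∧ rest = [] := by
      have h := List.cons_eq_cons.mp hcands.symm
      exact ⟨h.1, h.2⟩
    subst hb0; subst hrest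
    simp only [List.foldl_nil]
    apply pv_unique keys item _ (hmemk 0 hn0)
    intro y hy
    obtain ⟨j, hj, rfl⟩ := List.mem_iff_getElem.mp (hperm.mem_iff.mpr hy)
    have hitem : item ≤ skeys[0] := hhighE 0 hn0 (by omega)
    rcases Nat.eq_zero_or_pos j with rfl | hjpos
    · exact ⟨le_refl _, fun _ => le_refl _⟩
    · have hlt0j : skeys[0] < skeys[j] := hmono 0 j hn0 hj hjpos
      refine ⟨by omega, fun hEq => absurd hEq (by omega)⟩
  rcases Nat.lt_or_ge lo n with hlon | hge
  · -- 0 < lo < n : two candidates skeys[lo-1], skeys[lo]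
    obtain ⟨i, hloi⟩ : ∃ i, lo = i + 1 := ⟨lo - 1, by omega⟩
    rw [hloi] at hcands
    rw [pv_slice_mid skeys i (by omega)] at hcands
    obtain ⟨hb0, hrest⟩ : best0 = skeys[i] ∧ rest = [skeys[i + 1]] := by
      have h := List.cons_eq_cons.mp hcands.symm
      exact ⟨h.1, h.2⟩
    subst hb0; subst hrest
    simp only [List.foldl_cons, List.foldl_nil]
    have hia : i < n := by omega
    have hib : i + 1 < n := by omega
    have hamem : skeys[i] ∈ keys := hmemk i hia
    have hbmem : skeys[i + 1] ∈ keys := hmemk (i + 1) hib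
    have ha : skeys[i] < item := hlowE i hia (by omega)
    have hb : item ≤ skeys[i + 1] := hhighE (i + 1) hib (by omega)
    rw [hrank _ hbmem, hrank _ hamem]
    have hcast : ((keys.idxOf skeys[i + 1] : Int) < (keys.idxOf skeys[i] : Int))
        ↔ keys.idxOf skeys[i + 1] < keys.idxOf skeys[i] := by exact_mod_cast Iff.rfl
    split_ifs with hcond
    · -- picked the right candidate b = skeys[i+1]
      apply pv_unique keys item _ hbmem
      intro y hy
      obtain ⟨j, hj, rfl⟩ := List.mem_iff_getElem.mp (hperm.mem_iff.mpr hy)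
      have hcd : (skeys[i + 1] - item).natAbs < (skeys[i] - item).natAbs ∨
          ((skeys[i + 1] - item).natAbs = (skeys[i] - item).natAbs ∧
            keys.idxOf skeys[i + 1] < keys.idxOf skeys[i]) := by
        rcases hcond with h' | ⟨h1, h2⟩
        · exact Or.inl h'
        · exact Or.inr ⟨h1, hcast.mp h2⟩
      rcases Nat.lt_trichotomy j i with hji | hji | hji
      · have h1 : skeys[j] < skeys[i] := hmono j i hj hia hji
        have h2 : skeys[j] < item := hlowE j hj (by omega)
        refine ⟨by omega, fun hEq => absurd hEq (by omega)⟩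
      · subst hji
        rcases hcd with h' | ⟨h1, h2⟩
        · refine ⟨by omega, fun hEq => absurd hEq (by omega)⟩
        · exact ⟨by omega, fun _ => le_of_lt h2⟩
      · rcases Nat.lt_or_ge j (i + 2) with hj2 | hj2
        · have : j = i + 1 := by omega
          subst this
          exact ⟨le_refl _, fun _ => le_refl _⟩
        · have h1 : skeys[i + 1] < skeys[j] := hmono (i + 1) j hib hj (by omega)
          refine ⟨by omega, fun hEq => absurd hEq (by omega)⟩
    · -- kept the left candidate a = skeys[i]
      push Not at hcond
      obtain ⟨hda, htie⟩ := hcond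
      apply pv_unique keys item _ hamem
      intro y hy
      obtain ⟨j, hj, rfl⟩ := List.mem_iff_getElem.mp (hperm.mem_iff.mpr hy)
      rcases Nat.lt_trichotomy j i with hji | hji | hji
      · have h1 : skeys[j] < skeys[i] := hmono j i hj hia hji
        have h2 : skeys[j] < item := hlowE j hj (by omega)
        refine ⟨by omega, fun hEq => absurd hEq (by omega)⟩
      · subst hji
        exact ⟨le_refl _, fun _ => le_refl _⟩
      · rcases Nat.lt_or_ge j (i + 2) with hj2 | hj2
        · have : j = i + 1 := by omega
          subst this
          refine ⟨by omega, fun hEq => le_of_not_gt (fun hgt => ?_)⟩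
          have h3 : keys.idxOf skeys[i] ≤ keys.idxOf skeys[i + 1] := by
            exact_mod_cast htie (by omega)
          omega
        · have h1 : skeys[i + 1] < skeys[j] := hmono (i + 1) j hib hj (by omega)
          refine ⟨by omega, fun hEq => absurd hEq (by omega)⟩
  · -- lo = n : every key is below item, unique nearest is the last sorted key
    have hloeq : lo = n := by omega
    rw [hloeq] at hcands
    rw [hndef] at hcands
    rw [pv_slice_last skeys hn0] at hcands
    obtain ⟨hb0, hrest⟩ : best0 = skeys[skeys.length - 1] ∧ rest = [] := by
      have h := List.cons_eq_cons.mp hcands.symm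
      exact ⟨h.1, h.2⟩
    subst hb0; subst hrest
    simp only [List.foldl_nil]
    have hlast : skeys.length - 1 < n := by omega
    apply pv_unique keys item _ (hmemk _ hlast)
    intro y hy
    obtain ⟨j, hj, rfl⟩ := List.mem_iff_getElem.mp (hperm.mem_iff.mpr hy)
    have hjitem : skeys[j] < item := hlowE j hj (by omega)
    have hlitem : skeys[skeys.length - 1] < item := hlowE _ hlast (by omega)
    rcases Nat.lt_or_ge j (skeys.length - 1) with hjl | hjl
    · have h1 : skeys[j] < skeys[skeys.length - 1] := hmono j _ hj hlast hjl
      refine ⟨by omega, fun hEq => absurd hEq (by omega)⟩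
    · have : j = skeys.length - 1 := by omega
      subst this
      exact ⟨le_refl _, fun _ => le_refl _⟩
theorem pv_cands_ne_nil (skeys : List Int) (hne : skeys ≠ []) (lo : Nat) (hlo : lo ≤ skeys.length) :
    PySem.List.slice skeys (some ((lo - 1 : Nat) : Int)) (some ((lo + 1 : Nat) : Int)) ≠ [] := by
  have hn0 : 0 < skeys.length := List.length_pos_of_ne_nil hne
  rcases Nat.eq_zero_or_pos lo with rfl | hpos
  · rw [pv_slice_one skeys hn0]
    simp
  · rcases Nat.lt_or_ge lo skeys.length with hlt | hge
    · obtain ⟨i, rfl⟩ : ∃ i, lo = i + 1 := ⟨lo - 1, by omega⟩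
      rw [pv_slice_mid skeys i hlt]
      simp
    · have : lo = skeys.length := by omega
      subst this
      rw [pv_slice_last skeys hn0]
      simp

theorem pv_foldl_ext {α β : Type} (f g : β → α → β) (h : ∀ b a, f b a = g b a) :
    ∀ (l : List α) (init : β), l.foldl f init = l.foldl g init := by
  intro l
  induction l with
  | nil => intro init; rfl
  | cons x t ih =>
    intro init
    rw [List.foldl_cons, List.foldl_cons, h]
    exact ih _

-- ===== VERDICT (by name: the statement is the Claim_ definition above) =====
theorem NumericalCompare_spec : Claim_equal_NumericalCompare := by
  intro dictionary aList _ hpre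
  unfold Spec_NumericalCompare NumericalCompare NumericalCompare_alt
  simp only []
  rcases eq_or_ne dictionary [] with rfl | hdne
  · have hal : aList = [] := by
      rcases hpre with h | h
      · exact absurd rfl h
      · exact h
    subst hal
    rfl
  · set d := PySem.Dict.ofList dictionary with hd
    set keys := d.keys with hkeys
    have hknd : keys.Nodup := pv_nodup_keys_ofList dictionary
    have hkne : keys ≠ [] := pv_keys_ofList_ne_nil dictionary hdne
    set skeys := PySem.List.sorted keys (fun x => x) with hsk
    have hskne : skeys ≠ [] := by
      intro hnil
      apply hkne
      have hlen := (PySem.List.sorted_perm keys (fun x => x) false).length_eq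
      rw [← hsk, hnil] at hlen
      exact List.eq_nil_of_length_eq_zero hlen.symm
    have hle : skeys.Pairwise (fun a b => a ≤ b) := PySem.List.sorted_pairwise keys (fun x => x)
    apply pv_foldl_ext
    intro acc item
    have hloN : pvBisect skeys item 0 skeys.length ≤ skeys.length :=
      (pvBisect_spec skeys item hle 0 skeys.length (Nat.zero_le _) (le_refl _)
        (by intro j hj; omega) (by intro j h1 h2; omega)).2.1
    obtain ⟨best0, rest, hcands⟩ := List.exists_cons_of_ne_nil
      (pv_cands_ne_nil skeys hskne (pvBisect skeys item 0 skeys.length) hloN)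
    rw [hcands]
    rw [pv_core keys hknd hkne item best0 rest hcands]
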